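-- pv_equiv track=rewrite | github.com/alanlindsay100/mast_xaip_toolkit | xaip_tools/xaip_tools.py | gather_values
-- ===== SOURCE A (Python) =====
-- def gather_values(lst):
--   result = []
--   current_value = lst[0]
--   for value in lst:
--     if value[0] != current_value[0]:
--       result.append(current_value)
--       current_value = value
--   result.append(current_value)
--   return result
-- ===== SOURCE B (Python) =====
-- def gather_values(lst):
--   # Alternative decomposition: outer loop per run (take the run's first element,
--   # then skip the whole run by index) instead of A's current-value tracking.
--   # Returns [] on an empty list (A raises IndexError there).
--   result = []
--   i = 0
--   while i < len(lst):
--     key = lst[i][0]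
--     result.append(lst[i])
--     while i < len(lst) and lst[i][0] == key:
--       i += 1
--   return result
-- ===== Notes on version B (the rewrite author's own statement) =====
-- stated objective: alternative
-- what changed: Replaces A's single pass with current-value state by a run-by-run decomposition: take each run's first element, then skip the run with an inner index loop.
import Mathlib
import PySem

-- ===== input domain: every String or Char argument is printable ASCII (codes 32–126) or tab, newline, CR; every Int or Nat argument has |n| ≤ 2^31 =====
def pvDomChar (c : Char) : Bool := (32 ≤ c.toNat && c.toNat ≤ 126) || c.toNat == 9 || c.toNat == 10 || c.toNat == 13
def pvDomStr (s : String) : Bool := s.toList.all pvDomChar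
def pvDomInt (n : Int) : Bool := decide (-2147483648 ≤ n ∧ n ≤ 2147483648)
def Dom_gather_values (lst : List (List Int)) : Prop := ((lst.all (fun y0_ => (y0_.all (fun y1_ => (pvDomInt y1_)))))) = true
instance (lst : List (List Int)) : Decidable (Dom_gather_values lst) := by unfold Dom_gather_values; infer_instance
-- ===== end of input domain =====

-- B replaces A's current-value tracking pass by a run-by-run decomposition (take each run's
-- first element, then skip the run); same return values wherever A returns (Pre_: nonempty
-- list of nonempty sublists — A raises IndexError otherwise).


-- ===== PORT A =====
-- literal port of A: current_value = lst[0]; one pass, appending current_value at key changes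
def gather_values (lst : List (List Int)) : List (List Int) :=
  match PySem.List.pyGet? lst 0 with
  | none => []   -- IndexError in Python (excluded by Pre_)
  | some cv0 =>
    let st := lst.foldl
      (fun (st : List (List Int) × List Int) value =>
        if PySem.List.pyGet? value 0 ≠ PySem.List.pyGet? st.2 0 then
          (st.1 ++ [st.2], value)
        else st)
      ([], cv0)
    st.1 ++ [st.2]

-- ===== PORT B =====
-- port of B: per run, take the first element and skip the run (the inner index loop
-- 'while lst[i][0] == key: i += 1' is the dropWhile on the rest of the list)
def gather_values_alt (lst : List (List Int)) : List (List Int) :=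
  match lst with
  | [] => []
  | x :: xs =>
    x :: gather_values_alt (xs.dropWhile (fun y => PySem.List.pyGet? y 0 == PySem.List.pyGet? x 0))
termination_by lst.length
decreasing_by
  simp only [List.length_cons]
  exact Nat.lt_succ_of_le (List.length_dropWhile_le _ _)

-- ===== PRECONDITION & SPEC =====
-- Pre_: exactly where Python A returns: a nonempty list of nonempty sublists
-- (lst[0] and value[0] raise IndexError otherwise)
def Pre_gather_values (lst : List (List Int)) : Prop :=
  lst ≠ [] ∧ ∀ v ∈ lst, v ≠ []
instance (lst : List (List Int)) : Decidable (Pre_gather_values lst) := by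
  unfold Pre_gather_values; infer_instance

def pvWitness_gather_values : List (List Int) := [[1, 2], [1], [3], [3, 4], [1]]

def Spec_gather_values (lst : List (List Int)) (out : List (List Int)) : Prop :=
  out = gather_values_alt lst
instance (lst : List (List Int)) (out : List (List Int)) : Decidable (Spec_gather_values lst out) := by
  unfold Spec_gather_values; infer_instance

-- ===== CLAIM (what is proved, stated in full; the proofs are below) =====
def Claim_equal_gather_values : Prop :=
  ∀ (lst : List (List Int)), Dom_gather_values lst → Pre_gather_values lst →
    Spec_gather_values lst (gather_values lst)

-- ===== LEMMAS AND PROOFS =====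

-- A's loop body
def gvStep (st : List (List Int) × List Int) (value : List Int) : List (List Int) × List Int :=
  if PySem.List.pyGet? value 0 ≠ PySem.List.pyGet? st.2 0 then (st.1 ++ [st.2], value) else st

-- invariant: the fold from state (result, cv) over rest, followed by the final append,
-- equals result ++ cv :: (the runs of rest after dropping cv's own run)
theorem gv_loop_eq (rest : List (List Int)) :
    ∀ (result : List (List Int)) (cv : List Int),
      (let st := rest.foldl gvStep (result, cv); st.1 ++ [st.2]) =
        result ++ cv :: gather_values_alt
          (rest.dropWhile (fun y => PySem.List.pyGet? y 0 == PySem.List.pyGet? cv 0)) := by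
  induction rest with
  | nil => intro result cv; simp [gather_values_alt]
  | cons y t ih =>
    intro result cv
    by_cases h : PySem.List.pyGet? y 0 = PySem.List.pyGet? cv 0
    · have hstep : gvStep (result, cv) y = (result, cv) := by
        simp [gvStep, h]
      simp only [List.foldl_cons, hstep, List.dropWhile_cons]
      rw [ih result cv]
      simp [h]
    · have hstep : gvStep (result, cv) y = (result ++ [cv], y) := by
        simp [gvStep, h]
      simp only [List.foldl_cons, hstep, List.dropWhile_cons]
      rw [ih (result ++ [cv]) y]
      simp [h, gather_values_alt]

-- ===== VERDICT (by name: the statement is the Claim_ definition above) =====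
theorem gather_values_spec : Claim_equal_gather_values := by
  intro lst _ hpre
  unfold Spec_gather_values
  obtain ⟨hne, -⟩ := hpre
  obtain ⟨x, xs, rfl⟩ := List.exists_cons_of_ne_nil hne
  unfold gather_values
  rw [PySem.List.pyGet?_zero_cons]
  simp only [List.foldl_cons]
  have hfirst : gvStep ([], x) x = ([], x) := by simp [gvStep]
  simp only [gvStep] at hfirst
  rw [show (fun (st : List (List Int) × List Int) value =>
      if PySem.List.pyGet? value 0 ≠ PySem.List.pyGet? st.2 0 then (st.1 ++ [st.2], value) else st) =
      gvStep from rfl]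
  rw [hfirst, gv_loop_eq xs [] x]
  simp [gather_values_alt]
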